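-- pv_equiv track=rewrite | github.com/mechauk418/BOJ | 프로그래머스/lv2/42626. 더 맵게/더 맵게.py | solution
-- ===== SOURCE A (Python) =====
-- import heapq
--
-- def solution(scoville, K):
--
--     heapq.heapify(scoville)
--     cnt = 0
--     while len(scoville)>1:
--
--         elem1 = heapq.heappop(scoville)
--
--         if elem1 <K:
--             elem2 = heapq.heappop(scoville)
--             mix = elem1 + (elem2 *2)
--             heapq.heappush(scoville,mix)
--             if mix < K and len(scoville)==1:
--                 answer = -1
--                 return answer
--             cnt+=1
--         else:
--             break
--
--     answer = cnt
--
--     return answer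
-- ===== SOURCE B (Python) =====
-- # B: no heap -- keep the pot as a plain list and scan for the minimum each round.
-- # (A mutates the scoville argument in place via heapify/heappop; B does not --
-- #  the equivalence claimed is about the return value only.)
-- def solution(scoville, K):
--     pot = list(scoville)
--     cnt = 0
--     while len(pot) > 1:
--         m1 = min(pot)
--         if m1 >= K:
--             break
--         pot.remove(m1)
--         m2 = min(pot)
--         pot.remove(m2)
--         mix = m1 + 2 * m2
--         pot.append(mix)
--         if mix < K and len(pot) == 1:
--             return -1
--         cnt += 1
--     return cnt
-- ===== Notes on version B (the rewrite author's own statement) =====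
-- stated objective: simpler
-- what changed: Drops the heapq binary heap entirely: B keeps the pot as a plain list and each round scans it for the minimum (min/remove/append) instead of maintaining sift-up/sift-down heap order; B also leaves the argument list unmutated where A heapifies and pops it in place.
import Mathlib
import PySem

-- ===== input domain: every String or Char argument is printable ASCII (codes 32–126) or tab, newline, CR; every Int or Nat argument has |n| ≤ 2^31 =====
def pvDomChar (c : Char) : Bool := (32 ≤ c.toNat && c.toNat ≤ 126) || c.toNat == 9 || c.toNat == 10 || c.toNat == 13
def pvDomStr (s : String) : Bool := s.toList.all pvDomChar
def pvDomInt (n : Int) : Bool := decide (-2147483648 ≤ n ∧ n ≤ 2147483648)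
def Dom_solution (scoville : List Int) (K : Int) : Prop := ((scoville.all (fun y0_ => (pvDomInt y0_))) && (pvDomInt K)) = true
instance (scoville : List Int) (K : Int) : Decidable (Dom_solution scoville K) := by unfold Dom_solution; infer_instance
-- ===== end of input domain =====

-- B replaces A's heapq binary heap by a plain minimum-scan list; same return value
-- (A mutates the scoville list in place, B does not: the claim is about the return value only).

-- ===== PORT A =====
-- A calls heapq.heapify/heappop/heappush; PySem has no heap, so CPython's heapq
-- (Lib/heapq.py: _siftdown, _siftup, heapify, heappop, heappush) is ported by hand
-- below, step for step; it is exact on every list of ints.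

-- heap[i] ; every access in heapq is in range, so the default 0 is never returned
def hGet (h : List Int) (i : Nat) : Int := h.getD i 0

-- heapq._siftdown(heap, startpos, pos) with newitem = heap[pos] passed explicitly.
-- fuel is a structural totality device only: pos strictly decreases each pass, so
-- fuel = pos suffices and the fuel-0 base (= the loop-exit assignment) is never reached early.
def siftdownLoop (fuel : Nat) (h : List Int) (startpos pos : Nat) (newitem : Int) : List Int :=
  match fuel with
  | 0 => h.set pos newitem
  | fuel + 1 =>
    if startpos < pos then
      let parentpos := (pos - 1) / 2
      let parent := hGet h parentpos
      if newitem < parent then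
        siftdownLoop fuel (h.set pos parent) startpos parentpos newitem
      else h.set pos newitem
    else h.set pos newitem

-- heapq._siftup(heap, pos): the while-loop; endpos = len(heap), newitem = heap[pos].
-- fuel again only makes the while-loop structural: endpos - pos strictly decreases, so
-- fuel = endpos suffices and the fuel-0 base (= the loop-exit code) is never reached early.
def siftupLoop (fuel : Nat) (h : List Int) (endpos startpos pos : Nat) (newitem : Int) : List Int :=
  match fuel with
  | 0 => siftdownLoop pos (h.set pos newitem) startpos pos newitem
  | fuel + 1 =>
    let childpos := 2 * pos + 1
    if childpos < endpos then
      let rightpos := childpos + 1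
      let childpos2 :=
        if rightpos < endpos ∧ ¬ hGet h childpos < hGet h rightpos then rightpos else childpos
      siftupLoop fuel (h.set pos (hGet h childpos2)) endpos startpos childpos2 newitem
    else
      -- heap[pos] = newitem; _siftdown(heap, startpos, pos)  (which re-reads newitem = heap[pos])
      siftdownLoop pos (h.set pos newitem) startpos pos newitem

def siftup (h : List Int) (pos : Nat) : List Int :=
  siftupLoop h.length h h.length pos pos (hGet h pos)

-- heapq.heapify: for i in reversed(range(n//2)): _siftup(x, i)
def heapify (h : List Int) : List Int :=
  (List.range (h.length / 2)).reverse.foldl (fun acc i => siftup acc i) h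

-- heapq.heappop; Python raises IndexError on an empty heap — A only pops a
-- non-empty heap, so the .getD 0 default on getLast? is never used
def heappop (h : List Int) : Int × List Int :=
  let lastelt := (h.getLast?).getD 0
  let rest := h.dropLast
  if rest = [] then (lastelt, rest)
  else
    let returnitem := hGet rest 0
    (returnitem, siftup (rest.set 0 lastelt) 0)

-- heapq.heappush: heap.append(item); _siftdown(heap, 0, len(heap)-1)
def heappush (h : List Int) (item : Int) : List Int :=
  let h2 := h ++ [item]
  siftdownLoop (h2.length - 1) h2 0 (h2.length - 1) item

-- the while-loop of A's solution; each pass shrinks the heap by one element, so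
-- fuel = the initial length makes the loop structural and is never exhausted early
def solutionLoop (fuel : Nat) (K : Int) (h : List Int) (cnt : Int) : Int :=
  match fuel with
  | 0 => cnt
  | fuel + 1 =>
    if 1 < h.length then
      let elem1 := (heappop h).1
      let h1 := (heappop h).2
      if elem1 < K then
        let elem2 := (heappop h1).1
        let h2 := (heappop h1).2
        let mix := elem1 + elem2 * 2
        let h3 := heappush h2 mix
        if mix < K ∧ h3.length = 1 then -1
        else solutionLoop fuel K h3 (cnt + 1)
      else cnt
    else cnt

def solution (scoville : List Int) (K : Int) : Int :=
  solutionLoop scoville.length K (heapify scoville) 0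

-- ===== PORT B =====
-- B's while-loop: min-scan on a plain list.  min() on an empty list and
-- list.remove of an absent value raise in Python; both are unreachable here
-- (the guards ensure non-emptiness and membership), so .getD defaults are never used.
-- each pass removes two elements and appends one, so fuel = the initial length
-- makes B's while-loop structural and is never exhausted early
def altLoop (fuel : Nat) (K : Int) (pot : List Int) (cnt : Int) : Int :=
  match fuel with
  | 0 => cnt
  | fuel + 1 =>
    if 1 < pot.length then
      let m1 := (PySem.List.min? pot (fun y => y)).getD 0
      if m1 ≥ K then cnt
      else
        let pot1 := (PySem.List.remove? pot m1).getD []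
        let m2 := (PySem.List.min? pot1 (fun y => y)).getD 0
        let pot2 := (PySem.List.remove? pot1 m2).getD []
        let mix := m1 + 2 * m2
        let pot3 := pot2 ++ [mix]
        if mix < K ∧ pot3.length = 1 then -1
        else altLoop fuel K pot3 (cnt + 1)
    else cnt

def solution_alt (scoville : List Int) (K : Int) : Int :=
  altLoop scoville.length K scoville 0

-- ===== PRECONDITION & SPEC =====
def Spec_solution (scoville : List Int) (K : Int) (out : Int) : Prop := out = solution_alt scoville K
instance (scoville : List Int) (K : Int) (out : Int) : Decidable (Spec_solution scoville K out) := by unfold Spec_solution; infer_instance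

-- ===== CLAIM (what is proved, stated in full; the proofs are below) =====
def Claim_equal_solution : Prop := ∀ (scoville : List Int) (K : Int), Dom_solution scoville K → Spec_solution scoville K (solution scoville K)

-- ===== LEMMAS AND PROOFS =====

-- length facts about the heap operations
theorem length_siftdownLoop (fuel : Nat) (h : List Int) (s p : Nat) (x : Int) :
    (siftdownLoop fuel h s p x).length = h.length := by
  fun_induction siftdownLoop fuel h s p x <;> simp_all

theorem length_siftupLoop (fuel : Nat) (h : List Int) (e s p : Nat) (x : Int) :
    (siftupLoop fuel h e s p x).length = h.length := by
  fun_induction siftupLoop fuel h e s p x <;> simp_all [length_siftdownLoop]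

theorem length_heappop (h : List Int) : (heappop h).2.length = h.length - 1 := by
  by_cases hr : h.dropLast = []
  · have := congrArg List.length hr
    simp only [List.length_dropLast, List.length_nil] at this
    simp [heappop, hr]
    omega
  · simp [heappop, hr, siftup, length_siftupLoop, List.length_dropLast]

theorem length_heappush (h : List Int) (x : Int) :
    (heappush h x).length = h.length + 1 := by
  simp [heappush, length_siftdownLoop]

-- parent/child index relation of the implicit binary-heap tree
def Childrel (i j : Nat) : Prop := j = 2 * i + 1 ∨ j = 2 * i + 2

-- j lies in the subtree rooted at s
def isDesc (s j : Nat) : Bool :=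
  if j < s then false
  else if j = s then true
  else isDesc s ((j - 1) / 2)
termination_by j
decreasing_by omega

theorem isDesc_self (s : Nat) : isDesc s s = true := by rw [isDesc]; simp

theorem le_of_isDesc {s j : Nat} (h : isDesc s j = true) : s ≤ j := by
  fun_induction isDesc s j <;> simp_all

theorem parent_eq {i j : Nat} (h : Childrel i j) : (j - 1) / 2 = i := by
  rcases h with h | h <;> omega

theorem lt_of_childrel {i j : Nat} (h : Childrel i j) : i < j := by
  rcases h with h | h <;> omega

theorem isDesc_child {s i j : Nat} (hc : Childrel i j) (h : isDesc s i = true) :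
    isDesc s j = true := by
  have hij := lt_of_childrel hc
  have hsi := le_of_isDesc h
  rw [isDesc, if_neg (by omega), if_neg (by omega), parent_eq hc]; exact h

theorem isDesc_parent {s j : Nat} (h : isDesc s j = true) (hne : j ≠ s) :
    isDesc s ((j - 1) / 2) = true := by
  have := le_of_isDesc h
  rw [isDesc, if_neg (by omega), if_neg hne] at h; exact h

theorem isDesc_zero (j : Nat) : isDesc 0 j = true := by
  induction j using Nat.strong_induction_on with
  | _ j ih =>
    rw [isDesc]
    rcases Nat.eq_zero_or_pos j with h | h
    · simp [h]
    · rw [if_neg (by omega), if_neg (by omega)]; exact ih _ (by omega)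

theorem not_isDesc_child {s i j : Nat} (hc : Childrel i j) (hsi : s ≤ i)
    (h : isDesc s i = false) : isDesc s j = false := by
  have hij := lt_of_childrel hc
  have hjs : j ≠ s := by intro he; subst he; rcases hc with h' | h' <;> omega
  rw [isDesc, if_neg (by omega), if_neg hjs, parent_eq hc]; exact h

theorem hGet_eq_getElem {l : List Int} {i : Nat} (hi : i < l.length) : hGet l i = l[i] := by
  simp [hGet, List.getD_eq_getElem?_getD, List.getElem?_eq_getElem hi]

theorem hGet_mem {l : List Int} {i : Nat} (hi : i < l.length) : hGet l i ∈ l := by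
  rw [hGet_eq_getElem hi]; exact List.getElem_mem hi

theorem hGet_set_self {l : List Int} {i : Nat} (hi : i < l.length) (v : Int) :
    hGet (l.set i v) i = v := by
  simp [hGet, List.getD_eq_getElem?_getD, hi]

theorem hGet_set_ne {l : List Int} {i k : Nat} (h : i ≠ k) (v : Int) :
    hGet (l.set i v) k = hGet l k := by
  simp [hGet, List.getD_eq_getElem?_getD, h]

theorem hGet_append_lt {l : List Int} {i : Nat} (hi : i < l.length) (x : Int) :
    hGet (l ++ [x]) i = hGet l i := by
  simp [hGet, List.getD_eq_getElem?_getD, List.getElem?_append_left hi]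

theorem hGet_append_self (l : List Int) (x : Int) : hGet (l ++ [x]) l.length = x := by
  simp [hGet, List.getD_eq_getElem?_getD]

theorem hGet_dropLast {l : List Int} {i : Nat} (hi : i < l.length - 1) :
    hGet l.dropLast i = hGet l i := by
  simp [hGet, List.getD_eq_getElem?_getD, hi,
    List.getElem?_eq_getElem (show i < l.length by omega)]

theorem ms_set {l : List Int} {i : Nat} (hi : i < l.length) (v : Int) :
    (↑(l.set i v) : Multiset Int) + {hGet l i} = ↑l + {v} := by
  rw [List.set_eq_take_cons_drop v hi, hGet_eq_getElem hi]
  have h2 : l.drop i = l[i] :: l.drop (i + 1) := (List.getElem_cons_drop hi).symm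
  conv_rhs => rw [← List.take_append_drop i l, h2]
  refine Multiset.ext.mpr fun a => ?_
  simp only [Multiset.count_add, Multiset.coe_count, List.count_append, List.count_cons,
    Multiset.count_singleton, beq_iff_eq]
  split_ifs <;> omega

theorem ms_set_self {l : List Int} {i : Nat} (hi : i < l.length) :
    (↑(l.set i (hGet l i)) : Multiset Int) = ↑l := by
  rw [hGet_eq_getElem hi, List.set_getElem_self hi]

theorem ms_swap {l : List Int} {p q : Nat} (hp : p < l.length) (hq : q < l.length)
    (hne : p ≠ q) (x : Int) :
    (↑((l.set p (hGet l q)).set q x) : Multiset Int) = ↑(l.set p x) := by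
  have h1 := ms_set (l := l.set p (hGet l q)) (i := q) (by simpa using hq) x
  rw [hGet_set_ne hne] at h1
  have h2 := ms_set hp (hGet l q)
  have h3 := ms_set hp x
  have key : (↑((l.set p (hGet l q)).set q x) : Multiset Int) + ({hGet l q} + {hGet l p}) =
      ↑(l.set p x) + ({hGet l q} + {hGet l p}) := by
    calc (↑((l.set p (hGet l q)).set q x) : Multiset Int) + ({hGet l q} + {hGet l p})
        = (↑((l.set p (hGet l q)).set q x) + {hGet l q}) + {hGet l p} := by abel
      _ = (↑(l.set p (hGet l q)) + {x}) + {hGet l p} := by rw [h1]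
      _ = (↑(l.set p (hGet l q)) + {hGet l p}) + {x} := by abel
      _ = (↑l + {hGet l q}) + {x} := by rw [h2]
      _ = (↑l + {x}) + {hGet l q} := by abel
      _ = (↑(l.set p x) + {hGet l p}) + {hGet l q} := by rw [h3]
      _ = ↑(l.set p x) + ({hGet l q} + {hGet l p}) := by abel
  exact add_right_cancel key


-- bubble-up (_siftdown) correctness: heap-except-hole invariant, relative to the subtree at s
theorem siftdownLoop_spec (fuel : Nat) (h : List Int) (s p : Nat) (x : Int) :
    p ≤ fuel → p < h.length → isDesc s p = true →
    (∀ i j, Childrel i j → j < h.length → isDesc s i = true → i ≠ p → j ≠ p → hGet h i ≤ hGet h j) →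
    (∀ j, Childrel p j → j < h.length → x ≤ hGet h j) →
    (∀ q j, Childrel q p → isDesc s q = true → Childrel p j → j < h.length → hGet h q ≤ hGet h j) →
    ((siftdownLoop fuel h s p x).length = h.length ∧
     (↑(siftdownLoop fuel h s p x) : Multiset Int) = ↑(h.set p x) ∧
     (∀ k, isDesc s k = false → hGet (siftdownLoop fuel h s p x) k = hGet h k) ∧
     (∀ i j, Childrel i j → j < h.length → isDesc s i = true →
        hGet (siftdownLoop fuel h s p x) i ≤ hGet (siftdownLoop fuel h s p x) j)) := by
  fun_induction siftdownLoop fuel h s p x with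
  | case1 h pos =>
    intro hf hp hdesc pre1 pre2 pre3
    have hps : pos = s := by have := le_of_isDesc hdesc; omega
    refine ⟨by simp, rfl, ?_, ?_⟩
    · intro k hk
      have hkp : pos ≠ k := by intro he; rw [← he] at hk; rw [hdesc] at hk; cases hk
      exact hGet_set_ne hkp x
    · intro i j hc hj hdi
      by_cases hip : i = pos
      · have hjp : pos ≠ j := by have := lt_of_childrel hc; omega
        rw [hip, hGet_set_self hp, hGet_set_ne hjp]
        exact pre2 j (hip ▸ hc) hj
      · rw [hGet_set_ne (show pos ≠ i from fun he => hip he.symm)]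
        by_cases hjp : j = pos
        · exfalso
          have hpe := parent_eq hc
          have hsi := le_of_isDesc hdi
          rcases hc with h' | h' <;> omega
        · rw [hGet_set_ne (show pos ≠ j from fun he => hjp he.symm)]
          exact pre1 i j hc hj hdi hip hjp
  | case2 h pos fuel hsp parentpos parent hx ih =>
    intro hf hp hdesc pre1 pre2 pre3
    have hqdef : parentpos = (pos - 1) / 2 := rfl
    have hpar : parent = hGet h parentpos := rfl
    have hcq : Childrel parentpos pos := by unfold Childrel; omega
    have hqn : parentpos < h.length := by omega
    have hqp : parentpos ≠ pos := by omega
    have hdq : isDesc s parentpos = true := by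
      have hx2 := isDesc_parent hdesc (by omega)
      rwa [← hqdef] at hx2
    obtain ⟨L, M, F, E⟩ := ih (by omega) (by simp; omega) (by rwa [hqdef])
      (by -- pre1 for the new hole parentpos
        intro i j hcij hj hdi hiq hjq
        rw [List.length_set] at hj
        by_cases hip : i = pos
        · have hjp : j ≠ pos := by have := lt_of_childrel hcij; omega
          rw [hip, hGet_set_self hp, hGet_set_ne (show pos ≠ j by omega)]
          exact pre3 parentpos j hcq hdq (hip ▸ hcij) hj
        · rw [hGet_set_ne (show pos ≠ i by omega)]
          by_cases hjp : j = pos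
          · exfalso; have hpe := parent_eq hcij; omega
          · rw [hGet_set_ne (show pos ≠ j by omega)]
            exact pre1 i j hcij hj hdi hip hjp)
      (by -- pre2: x below the new hole
        intro j hcj hj
        rw [List.length_set] at hj
        by_cases hjp : j = pos
        · rw [hjp, hGet_set_self hp]; exact le_of_lt hx
        · rw [hGet_set_ne (show pos ≠ j by omega)]
          exact le_trans (le_of_lt hx) (pre1 parentpos j hcj hj hdq hqp hjp))
      (by -- pre3: grandparent below the grandchildren of the new hole
        intro q' j hcq' hdq' hcj hj
        rw [List.length_set] at hj
        have hq'lt : q' < parentpos := lt_of_childrel hcq'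
        rw [hGet_set_ne (show pos ≠ q' by omega)]
        by_cases hjp : j = pos
        · rw [hjp, hGet_set_self hp]
          exact pre1 q' parentpos hcq' hqn hdq' (by omega) hqp
        · rw [hGet_set_ne (show pos ≠ j by omega)]
          exact le_trans (pre1 q' parentpos hcq' hqn hdq' (by omega) hqp)
            (pre1 parentpos j hcj hj hdq hqp hjp))
    refine ⟨by rw [L]; simp, ?_, ?_, ?_⟩
    · rw [M, hpar]; exact ms_swap hp hqn (by omega) x
    · intro k hk
      have hkp : pos ≠ k := by intro he; rw [← he] at hk; rw [hdesc] at hk; cases hk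
      rw [F k hk, hGet_set_ne hkp]
    · intro i j hc hj hdi
      exact E i j hc (by simpa using hj) hdi
  | case3 h pos fuel hsp parentpos parent hx =>
    intro hf hp hdesc pre1 pre2 pre3
    have hqdef : parentpos = (pos - 1) / 2 := rfl
    have hpar : parent = hGet h parentpos := rfl
    refine ⟨by simp, rfl, ?_, ?_⟩
    · intro k hk
      have hkp : pos ≠ k := by intro he; rw [← he] at hk; rw [hdesc] at hk; cases hk
      exact hGet_set_ne hkp x
    · intro i j hc hj hdi
      by_cases hip : i = pos
      · have hjp : pos ≠ j := by have := lt_of_childrel hc; omega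
        rw [hip, hGet_set_self hp, hGet_set_ne hjp]
        exact pre2 j (hip ▸ hc) hj
      · rw [hGet_set_ne (show pos ≠ i from fun he => hip he.symm)]
        by_cases hjp : j = pos
        · rw [hjp, hGet_set_self hp]
          have hpe := parent_eq hc
          have hieq : i = parentpos := by omega
          rw [hieq, ← hpar]  -- goal: parent ≤ x? actually hGet h parentpos ≤ x
          exact not_lt.mp hx
        · rw [hGet_set_ne (show pos ≠ j from fun he => hjp he.symm)]
          exact pre1 i j hc hj hdi hip hjp
  | case4 h pos fuel hsp =>
    intro hf hp hdesc pre1 pre2 pre3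
    have hps : pos = s := by have := le_of_isDesc hdesc; omega
    refine ⟨by simp, rfl, ?_, ?_⟩
    · intro k hk
      have hkp : pos ≠ k := by intro he; rw [← he] at hk; rw [hdesc] at hk; cases hk
      exact hGet_set_ne hkp x
    · intro i j hc hj hdi
      by_cases hip : i = pos
      · have hjp : pos ≠ j := by have := lt_of_childrel hc; omega
        rw [hip, hGet_set_self hp, hGet_set_ne hjp]
        exact pre2 j (hip ▸ hc) hj
      · rw [hGet_set_ne (show pos ≠ i from fun he => hip he.symm)]
        by_cases hjp : j = pos
        · exfalso
          have hpe := parent_eq hc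
          have hsi := le_of_isDesc hdi
          rcases hc with h' | h' <;> omega
        · rw [hGet_set_ne (show pos ≠ j from fun he => hjp he.symm)]
          exact pre1 i j hc hj hdi hip hjp

-- hole-push-down (_siftup) correctness, relative to the subtree at s
theorem siftupLoop_spec (fuel : Nat) (h : List Int) (e s p : Nat) (x : Int) :
    e ≤ fuel + p → e = h.length → p < h.length → isDesc s p = true →
    (∀ i j, Childrel i j → j < h.length → isDesc s i = true → i ≠ p → hGet h i ≤ hGet h j) →
    (∀ q j, Childrel q p → isDesc s q = true → Childrel p j → j < h.length → hGet h q ≤ hGet h j) →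
    ((siftupLoop fuel h e s p x).length = h.length ∧
     (↑(siftupLoop fuel h e s p x) : Multiset Int) = ↑(h.set p x) ∧
     (∀ k, isDesc s k = false → hGet (siftupLoop fuel h e s p x) k = hGet h k) ∧
     (∀ i j, Childrel i j → j < h.length → isDesc s i = true →
        hGet (siftupLoop fuel h e s p x) i ≤ hGet (siftupLoop fuel h e s p x) j)) := by
  fun_induction siftupLoop fuel h e s p x with
  | case1 h pos =>
    intro hfe he hp hdesc pre1 pre3
    obtain ⟨L, M, F, E⟩ := siftdownLoop_spec pos (h.set pos x) s pos x (le_refl pos)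
      (by simpa using hp) hdesc
      (by intro i j hcij hj hdi hip hjp
          rw [List.length_set] at hj
          rw [hGet_set_ne (fun he' => hip he'.symm), hGet_set_ne (fun he' => hjp he'.symm)]
          exact pre1 i j hcij hj hdi hip)
      (by intro j hcj hj
          rw [List.length_set] at hj
          exfalso; rcases hcj with h' | h' <;> omega)
      (by intro q j hcq hdq hcj hj
          rw [List.length_set] at hj
          exfalso; rcases hcj with h' | h' <;> omega)
    refine ⟨by rw [L]; simp, ?_, ?_, ?_⟩
    · rw [M, List.set_set]
    · intro k hk
      have hkp : pos ≠ k := by intro he'; rw [← he'] at hk; rw [hdesc] at hk; cases hk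
      rw [F k hk, hGet_set_ne hkp]
    · intro i j hcij hj hdi
      exact E i j hcij (by simpa using hj) hdi
  | case2 h pos fuel childpos hc rightpos childpos2 ih =>
    intro hfe he hp hdesc pre1 pre3
    have hcd : childpos = 2 * pos + 1 := rfl
    have hrd : rightpos = childpos + 1 := rfl
    have hsplit : (childpos2 = rightpos ∧ rightpos < e ∧ hGet h rightpos ≤ hGet h childpos) ∨
        (childpos2 = childpos ∧ (rightpos < e → hGet h childpos < hGet h rightpos)) := by
      by_cases h' : rightpos < e ∧ ¬ hGet h childpos < hGet h rightpos
      · exact Or.inl ⟨if_pos h', h'.1, not_lt.mp h'.2⟩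
      · refine Or.inr ⟨if_neg h', fun hr => ?_⟩
        by_contra hnl
        exact h' ⟨hr, hnl⟩
    have hc2e : childpos2 < e := by rcases hsplit with ⟨h1, h2, _⟩ | ⟨h1, _⟩ <;> omega
    have hc2n : childpos2 < h.length := by omega
    have hrel : Childrel pos childpos2 := by
      unfold Childrel; rcases hsplit with ⟨h1, _, _⟩ | ⟨h1, _⟩ <;> omega
    have hmin : ∀ j, Childrel pos j → j < h.length → hGet h childpos2 ≤ hGet h j := by
      intro j hcj hj
      rcases hcj with hj1 | hj2
      · rcases hsplit with ⟨he1, _, hle⟩ | ⟨he1, _⟩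
        · rw [he1, show j = rightpos - 1 by omega, show rightpos - 1 = childpos by omega]
          exact hle
        · rw [he1, show j = childpos by omega]
      · rcases hsplit with ⟨he1, _, _⟩ | ⟨he1, himp⟩
        · rw [he1, show j = rightpos by omega]
        · rw [he1, show j = rightpos by omega]
          exact le_of_lt (himp (by omega))
    have hpn2 : pos ≠ childpos2 := by have := lt_of_childrel hrel; omega
    have hd2 : isDesc s childpos2 = true := isDesc_child hrel hdesc
    have hposlt : pos < childpos2 := lt_of_childrel hrel
    obtain ⟨L, M, F, E⟩ := ih (by omega) (by simp [he]) (by simpa using hc2n) hd2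
      (by -- pre1 for the new hole childpos2
        intro i j hcij hj hdi hic2
        rw [List.length_set] at hj
        by_cases hip : i = pos
        · rw [hip, hGet_set_self hp]
          by_cases hjc : j = childpos2
          · rw [hjc, hGet_set_ne hpn2]
          · rw [hGet_set_ne (show pos ≠ j by have := lt_of_childrel hcij; omega)]
            exact hmin j (hip ▸ hcij) hj
        · rw [hGet_set_ne (fun he' => hip he'.symm)]
          by_cases hjp : j = pos
          · rw [hjp, hGet_set_self hp]
            exact pre3 i childpos2 (hjp ▸ hcij) hdi hrel hc2n
          · rw [hGet_set_ne (fun he' => hjp he'.symm)]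
            exact pre1 i j hcij hj hdi hip)
      (by -- pre3 for the new hole childpos2
        intro q j hcq hdq hcj hj
        rw [List.length_set] at hj
        have hqp : q = pos := by
          have h1 := parent_eq hcq
          have h2 := parent_eq hrel
          omega
        subst hqp
        rw [hGet_set_self hp]
        have hjgt := lt_of_childrel hcj
        have hgt := lt_of_childrel hrel
        rw [hGet_set_ne (show q ≠ j by omega)]
        exact pre1 childpos2 j hcj hj hd2 (fun he' => hpn2 he'.symm))
    refine ⟨by rw [L]; simp, ?_, ?_, ?_⟩
    · rw [M]; exact ms_swap hp hc2n hpn2 x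
    · intro k hk
      have hkp : pos ≠ k := by intro he'; rw [← he'] at hk; rw [hdesc] at hk; cases hk
      rw [F k hk, hGet_set_ne hkp]
    · intro i j hcij hj hdi
      exact E i j hcij (by simpa using hj) hdi
  | case3 h pos fuel childpos hc =>
    intro hfe he hp hdesc pre1 pre3
    have hcd : childpos = 2 * pos + 1 := rfl
    obtain ⟨L, M, F, E⟩ := siftdownLoop_spec pos (h.set pos x) s pos x (le_refl pos)
      (by simpa using hp) hdesc
      (by intro i j hcij hj hdi hip hjp
          rw [List.length_set] at hj
          rw [hGet_set_ne (fun he' => hip he'.symm), hGet_set_ne (fun he' => hjp he'.symm)]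
          exact pre1 i j hcij hj hdi hip)
      (by intro j hcj hj
          rw [List.length_set] at hj
          exfalso; rcases hcj with h' | h' <;> omega)
      (by intro q j hcq hdq hcj hj
          rw [List.length_set] at hj
          exfalso; rcases hcj with h' | h' <;> omega)
    refine ⟨by rw [L]; simp, ?_, ?_, ?_⟩
    · rw [M, List.set_set]
    · intro k hk
      have hkp : pos ≠ k := by intro he'; rw [← he'] at hk; rw [hdesc] at hk; cases hk
      rw [F k hk, hGet_set_ne hkp]
    · intro i j hcij hj hdi
      exact E i j hcij (by simpa using hj) hdi

-- _siftup at s restores the heap property on the subtree at s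
theorem siftup_spec (h : List Int) (s : Nat) (hs : s < h.length)
    (pre : ∀ i j, Childrel i j → j < h.length → isDesc s i = true → i ≠ s → hGet h i ≤ hGet h j) :
    ((siftup h s).length = h.length ∧
     (↑(siftup h s) : Multiset Int) = ↑h ∧
     (∀ k, isDesc s k = false → hGet (siftup h s) k = hGet h k) ∧
     (∀ i j, Childrel i j → j < h.length → isDesc s i = true →
        hGet (siftup h s) i ≤ hGet (siftup h s) j)) := by
  unfold siftup
  obtain ⟨L, M, F, E⟩ := siftupLoop_spec h.length h h.length s s (hGet h s) (by omega) rfl hs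
    (isDesc_self s) pre
    (by intro q j hcq hdq hcj hj
        exfalso
        have := le_of_isDesc hdq
        rcases hcq with h' | h' <;> omega)
  exact ⟨L, by rw [M]; exact ms_set_self hs, F, E⟩

-- the heap property from parent index k upward, and the full heap property
def HeapFrom (h : List Int) (k : Nat) : Prop :=
  ∀ i j, Childrel i j → j < h.length → k ≤ i → hGet h i ≤ hGet h j

def IsHeap (h : List Int) : Prop := HeapFrom h 0

theorem foldl_siftup_spec (k : Nat) : ∀ (h : List Int), 2 * k ≤ h.length → HeapFrom h k →
    (((List.range k).reverse.foldl (fun acc i => siftup acc i) h).length = h.length ∧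
     (↑((List.range k).reverse.foldl (fun acc i => siftup acc i) h) : Multiset Int) = ↑h ∧
     HeapFrom ((List.range k).reverse.foldl (fun acc i => siftup acc i) h) 0) := by
  induction k with
  | zero =>
    intro h _ hf
    simp only [List.range_zero, List.reverse_nil, List.foldl_nil]
    exact ⟨trivial, trivial, hf⟩
  | succ k ihk =>
    intro h hk hf
    rw [List.range_succ, List.reverse_append]
    simp only [List.reverse_singleton, List.singleton_append, List.foldl_cons]
    have hkn : k < h.length := by omega
    obtain ⟨L1, M1, F1, E1⟩ := siftup_spec h k hkn (by
      intro i j hc hj hdi hik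
      exact hf i j hc hj (by have := le_of_isDesc hdi; omega))
    obtain ⟨L2, M2, H2⟩ := ihk (siftup h k) (by rw [L1]; omega) (by
      intro i j hc hj hki
      rw [L1] at hj
      by_cases hdi : isDesc k i = true
      · exact E1 i j hc hj hdi
      · have hdi' : isDesc k i = false := by simpa using hdi
        have hne : i ≠ k := by intro he'; rw [he', isDesc_self] at hdi'; cases hdi'
        have hdj : isDesc k j = false := not_isDesc_child hc hki hdi'
        rw [F1 i hdi', F1 j hdj]
        exact hf i j hc hj (by omega))
    exact ⟨by rw [L2, L1], by rw [M2, M1], H2⟩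

theorem heapify_spec (h : List Int) :
    (heapify h).length = h.length ∧ (↑(heapify h) : Multiset Int) = ↑h ∧ IsHeap (heapify h) := by
  have hf : HeapFrom h (h.length / 2) := by
    intro i j hc hj hki
    exfalso; rcases hc with h' | h' <;> omega
  obtain ⟨L, M, H⟩ := foldl_siftup_spec (h.length / 2) h (by omega) hf
  exact ⟨L, M, H⟩

theorem heap_min {h : List Int} (hh : IsHeap h) : ∀ j, j < h.length → hGet h 0 ≤ hGet h j := by
  intro j
  induction j using Nat.strong_induction_on with
  | _ j ih =>
    intro hj
    rcases Nat.eq_zero_or_pos j with h0 | h0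
    · subst h0; exact le_refl _
    · have hq : Childrel ((j - 1) / 2) j := by unfold Childrel; omega
      exact le_trans (ih ((j - 1) / 2) (by omega) (by omega)) (hh _ j hq hj (by omega))

theorem heap_min_mem {h : List Int} (hh : IsHeap h) {y : Int} (hy : y ∈ h) : hGet h 0 ≤ y := by
  obtain ⟨i, hi, rfl⟩ := List.mem_iff_getElem.mp hy
  rw [← hGet_eq_getElem hi]; exact heap_min hh i hi

theorem heappop_spec {h : List Int} (hne : h ≠ []) (hh : IsHeap h) :
    (heappop h).1 = hGet h 0 ∧ IsHeap (heappop h).2 ∧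
    (↑h : Multiset Int) = hGet h 0 ::ₘ ↑(heappop h).2 := by
  have hlen0 : 0 < h.length := List.length_pos_of_ne_nil hne
  by_cases hr : h.dropLast = []
  · have hl1 : h.length = 1 := by
      have := congrArg List.length hr
      simp only [List.length_dropLast, List.length_nil] at this
      omega
    obtain ⟨a, rfl⟩ := List.length_eq_one_iff.mp hl1
    refine ⟨by simp [heappop, hGet], ?_, by simp [heappop, hGet]⟩
    have h2 : (heappop [a]).2 = [] := by simp [heappop]
    rw [h2]
    intro i j hc hj h0
    simp at hj
  · have hl2 : 2 ≤ h.length := by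
      have hpos := List.length_pos_of_ne_nil hr
      rw [List.length_dropLast] at hpos; omega
    have hrl : h.dropLast.length = h.length - 1 := List.length_dropLast
    have hpop : heappop h =
        (hGet h.dropLast 0, siftup ((h.dropLast).set 0 (h.getLast?.getD 0)) 0) := by
      simp [heappop, hr]
    obtain ⟨L, M, F, E⟩ := siftup_spec ((h.dropLast).set 0 (h.getLast?.getD 0)) 0
      (by simp [hrl]; omega)
      (by intro i j hc hj hdi hi0
          rw [List.length_set, hrl] at hj
          have hij := lt_of_childrel hc
          have hj0 : j ≠ 0 := by rcases hc with h' | h' <;> omega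
          rw [hGet_set_ne (fun he' => hi0 he'.symm), hGet_set_ne (fun he' => hj0 he'.symm),
            hGet_dropLast (by omega), hGet_dropLast (by omega)]
          exact hh i j hc (by omega) (by omega))
    rw [hpop]
    refine ⟨hGet_dropLast (by omega), ?_, ?_⟩
    · intro i j hc hj h0
      have hj' : j < ((h.dropLast).set 0 (h.getLast?.getD 0)).length := by
        rw [← L]; exact hj
      exact E i j hc hj' (isDesc_zero i)
    · have hms := ms_set (l := h.dropLast) (i := 0) (by rw [hrl]; omega) (h.getLast?.getD 0)
      have hlast : h.getLast?.getD 0 = h.getLast hne := by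
        rw [List.getLast?_eq_some_getLast (l := h) (h := hne)]; rfl
      have hsplit : h.dropLast ++ [h.getLast hne] = h := List.dropLast_append_getLast hne
      have hcoe : (↑h.dropLast : Multiset Int) + {h.getLast hne} = ↑h := by
        conv_rhs => rw [← hsplit]
        rw [← Multiset.coe_singleton, Multiset.coe_add]
      have h0 : hGet h.dropLast 0 = hGet h 0 := hGet_dropLast (by omega)
      rw [h0] at hms
      calc (↑h : Multiset Int) = ↑h.dropLast + {h.getLast hne} := hcoe.symm
        _ = ↑h.dropLast + {h.getLast?.getD 0} := by rw [hlast]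
        _ = ↑((h.dropLast).set 0 (h.getLast?.getD 0)) + {hGet h 0} := hms.symm
        _ = hGet h 0 ::ₘ ↑((h.dropLast).set 0 (h.getLast?.getD 0)) := by
              rw [add_comm, Multiset.singleton_add]
        _ = hGet h 0 ::ₘ ↑(siftup ((h.dropLast).set 0 (h.getLast?.getD 0)) 0) := by rw [M]

theorem heappush_spec {h : List Int} (hh : IsHeap h) (x : Int) :
    IsHeap (heappush h x) ∧ (↑(heappush h x) : Multiset Int) = x ::ₘ ↑h := by
  have hlen : (h ++ [x]).length = h.length + 1 := by simp
  obtain ⟨L, M, F, E⟩ := siftdownLoop_spec ((h ++ [x]).length - 1) (h ++ [x]) 0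
    ((h ++ [x]).length - 1) x (le_refl _) (by omega) (isDesc_zero _)
    (by intro i j hc hj hdi hip hjp
        have hij := lt_of_childrel hc
        have hjn : j < h.length := by omega
        rw [hGet_append_lt (by omega), hGet_append_lt hjn]
        exact hh i j hc hjn (by omega))
    (by intro j hcj hj; exfalso; rcases hcj with h' | h' <;> omega)
    (by intro q j hcq hdq hcj hj; exfalso; rcases hcj with h' | h' <;> omega)
  constructor
  · intro i j hc hj h0
    have hj' : j < (h ++ [x]).length := by rw [length_heappush] at hj; omega
    exact E i j hc hj' (isDesc_zero i)
  · have hgn : hGet (h ++ [x]) ((h ++ [x]).length - 1) = x := by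
      rw [show (h ++ [x]).length - 1 = h.length by omega]
      exact hGet_append_self h x
    have hms := ms_set (l := h ++ [x]) (i := (h ++ [x]).length - 1) (by omega) x
    rw [hgn] at hms
    have hset : (↑((h ++ [x]).set ((h ++ [x]).length - 1) x) : Multiset Int) = ↑(h ++ [x]) :=
      add_right_cancel hms
    show (↑(siftdownLoop ((h ++ [x]).length - 1) (h ++ [x]) 0 ((h ++ [x]).length - 1) x) :
      Multiset Int) = x ::ₘ ↑h
    rw [M, hset, Multiset.cons_coe]
    exact Multiset.coe_eq_coe.mpr (List.perm_append_singleton _ _)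

-- B's min() scan returns exactly the heap's root value (both are the multiset minimum)
theorem min_eq_head {h pot : List Int} (hh : IsHeap h) (hne : h ≠ [])
    (hm : (↑h : Multiset Int) = ↑pot) :
    (PySem.List.min? pot (fun y => y)).getD 0 = hGet h 0 := by
  have hpne : pot ≠ [] := by
    intro he; rw [he] at hm; simp at hm; exact hne hm
  rcases hmo : PySem.List.min? pot (fun y => y) with _ | m
  · exact absurd ((PySem.List.min?_eq_none_iff pot _).mp hmo) hpne
  · have hmem : m ∈ pot := PySem.List.min?_mem hmo
    have hminv := PySem.List.min?_isMin hmo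
    have hmemh : m ∈ h := by rw [← Multiset.mem_coe, hm, Multiset.mem_coe]; exact hmem
    have h0m : hGet h 0 ≤ m := heap_min_mem hh hmemh
    have h0mem : hGet h 0 ∈ pot := by
      rw [← Multiset.mem_coe, ← hm, Multiset.mem_coe]
      exact hGet_mem (List.length_pos_of_ne_nil hne)
    have hm0 : m ≤ hGet h 0 := by simpa using hminv _ h0mem
    simp only [Option.getD_some]
    exact le_antisymm hm0 h0m

-- B's list.remove removes one copy of v, as a multiset
theorem removeD_ms {pot : List Int} {v : Int} (hv : v ∈ pot) :
    (↑((PySem.List.remove? pot v).getD []) : Multiset Int) = (↑pot : Multiset Int).erase v := by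
  rw [PySem.List.remove?_eq_some_erase pot v hv]
  simp only [Option.getD_some]
  exact (Multiset.coe_erase pot v).symm

-- the two while-loops agree whenever the heap and the plain pot hold the same multiset
theorem loop_eq (K : Int) : ∀ (n fa fb : Nat) (h pot : List Int) (cnt : Int), h.length = n →
    h.length ≤ fa + 1 → pot.length ≤ fb + 1 → IsHeap h → (↑h : Multiset Int) = ↑pot →
    solutionLoop fa K h cnt = altLoop fb K pot cnt := by
  intro n
  induction n using Nat.strong_induction_on with
  | _ n ih =>
    intro fa fb h pot cnt hlen hfa hfb hh hm
    have hplen : pot.length = h.length := by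
      have hc := congrArg Multiset.card hm
      simpa [Multiset.coe_card] using hc.symm
    rcases fa with _ | fa
    · rcases fb with _ | fb
      · rfl
      · rw [solutionLoop, altLoop, if_neg (show ¬ 1 < pot.length by omega)]
    rcases fb with _ | fb
    · rw [solutionLoop, altLoop, if_neg (show ¬ 1 < h.length by omega)]
    rw [solutionLoop, altLoop]
    by_cases hl : 1 < h.length
    · rw [if_pos hl, if_pos (show 1 < pot.length by omega)]
      simp only [ge_iff_le]
      have hne : h ≠ [] := by intro he; rw [he] at hl; simp at hl
      have hpne : pot ≠ [] := by intro he; rw [he] at hplen; simp at hplen; omega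
      obtain ⟨hp1, hp2, hp3⟩ := heappop_spec hne hh
      have hm1 : (PySem.List.min? pot (fun y => y)).getD 0 = hGet h 0 := min_eq_head hh hne hm
      rw [hp1, hm1]
      by_cases hek : hGet h 0 < K
      · rw [if_pos hek, if_neg (show ¬ K ≤ hGet h 0 by omega)]
        have hmem1 : hGet h 0 ∈ pot := by
          rw [← Multiset.mem_coe, ← hm, Multiset.mem_coe]
          exact hGet_mem (by omega)
        have hpot1 : (↑((PySem.List.remove? pot (hGet h 0)).getD []) : Multiset Int) =
            ↑(heappop h).2 := by
          rw [removeD_ms hmem1, ← hm, hp3, Multiset.erase_cons_head]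
        have hlen1 : (heappop h).2.length = h.length - 1 := length_heappop h
        have hne1 : (heappop h).2 ≠ [] := by
          intro he; rw [he] at hlen1; simp at hlen1; omega
        obtain ⟨hq1, hq2, hq3⟩ := heappop_spec hne1 hp2
        have hm2 : (PySem.List.min? ((PySem.List.remove? pot (hGet h 0)).getD [])
            (fun y => y)).getD 0 = hGet (heappop h).2 0 :=
          min_eq_head hp2 hne1 hpot1.symm
        rw [hq1, hm2]
        have hmem2 : hGet (heappop h).2 0 ∈ (PySem.List.remove? pot (hGet h 0)).getD [] := by
          rw [← Multiset.mem_coe, hpot1, Multiset.mem_coe]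
          exact hGet_mem (by omega)
        have hpot2 : (↑((PySem.List.remove? ((PySem.List.remove? pot (hGet h 0)).getD [])
            (hGet (heappop h).2 0)).getD []) : Multiset Int) = ↑(heappop (heappop h).2).2 := by
          rw [removeD_ms hmem2, hpot1, hq3, Multiset.erase_cons_head]
        obtain ⟨hs1, hs2⟩ := heappush_spec hq2 (hGet h 0 + hGet (heappop h).2 0 * 2)
        have hmixeq : hGet h 0 + 2 * hGet (heappop h).2 0 =
            hGet h 0 + hGet (heappop h).2 0 * 2 := by ring
        rw [hmixeq]
        have hm3 : (↑(heappush (heappop (heappop h).2).2 (hGet h 0 + hGet (heappop h).2 0 * 2)) :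
            Multiset Int) =
            ↑((PySem.List.remove? ((PySem.List.remove? pot (hGet h 0)).getD [])
              (hGet (heappop h).2 0)).getD [] ++ [hGet h 0 + hGet (heappop h).2 0 * 2]) := by
          rw [hs2, ← hpot2, Multiset.cons_coe]
          exact Multiset.coe_eq_coe.mpr (List.perm_append_singleton _ _).symm
        have hlen2 : (heappop (heappop h).2).2.length = h.length - 2 := by
          rw [length_heappop, hlen1]; omega
        have hlen3 : (heappush (heappop (heappop h).2).2
            (hGet h 0 + hGet (heappop h).2 0 * 2)).length = h.length - 1 := by
          rw [length_heappush, hlen2]; omega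
        have hplen3 : ((PySem.List.remove? ((PySem.List.remove? pot (hGet h 0)).getD [])
            (hGet (heappop h).2 0)).getD [] ++ [hGet h 0 + hGet (heappop h).2 0 * 2]).length =
            h.length - 1 := by
          have hc := congrArg Multiset.card hm3
          simp only [Multiset.coe_card] at hc
          rw [← hc, hlen3]
        rw [hlen3, hplen3]
        by_cases hg : hGet h 0 + hGet (heappop h).2 0 * 2 < K ∧ h.length - 1 = 1
        · rw [if_pos hg, if_pos hg]
        · rw [if_neg hg, if_neg hg]
          exact ih (h.length - 1) (by omega) fa fb _ _ (cnt + 1) hlen3 (by omega)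
            (by rw [hplen3]; omega) hs1 hm3
      · rw [if_neg hek, if_pos (show K ≤ hGet h 0 by omega)]
    · rw [if_neg hl, if_neg (show ¬ 1 < pot.length by omega)]

-- ===== VERDICT (by name: the statement is the Claim_ definition above) =====
theorem solution_spec : Claim_equal_solution := by
  unfold Claim_equal_solution
  intro scoville K _
  unfold Spec_solution solution solution_alt
  obtain ⟨L, M, H⟩ := heapify_spec scoville
  exact loop_eq K (heapify scoville).length scoville.length scoville.length
    (heapify scoville) scoville 0 rfl (by rw [L]; omega) (by omega) H M
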